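-- pv_equiv track=rewrite | github.com/MisterZork/Session3_Projet | main.py | min_order
-- ===== SOURCE A (Python) =====
-- def min_order(total_distances):
--     min = None
--     min_list = []
--     for arg in total_distances:
--         if min is None or arg <= min:
--             min = arg
--     for a in range(len(total_distances)):
--         if min == total_distances[a]:
--             min_list.append(a)
--     return min, min_list
-- ===== SOURCE B (Python) =====
-- def min_order(total_distances):
--     min = None
--     min_list = []
--     for i, arg in enumerate(total_distances):
--         if min is None or arg < min:
--             min = arg
--             min_list = [i]
--         elif arg == min:
--             min_list.append(i)
--     return min, min_list
-- ===== Notes on version B (the rewrite author's own statement) =====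
-- stated objective: simpler
-- what changed: Replaces A's two passes (a min-finding loop followed by an index scan over range(len)) with a single enumerate pass that keeps the running minimum and incrementally rebuilds the index list, resetting it on each new strict minimum.
import Mathlib
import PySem

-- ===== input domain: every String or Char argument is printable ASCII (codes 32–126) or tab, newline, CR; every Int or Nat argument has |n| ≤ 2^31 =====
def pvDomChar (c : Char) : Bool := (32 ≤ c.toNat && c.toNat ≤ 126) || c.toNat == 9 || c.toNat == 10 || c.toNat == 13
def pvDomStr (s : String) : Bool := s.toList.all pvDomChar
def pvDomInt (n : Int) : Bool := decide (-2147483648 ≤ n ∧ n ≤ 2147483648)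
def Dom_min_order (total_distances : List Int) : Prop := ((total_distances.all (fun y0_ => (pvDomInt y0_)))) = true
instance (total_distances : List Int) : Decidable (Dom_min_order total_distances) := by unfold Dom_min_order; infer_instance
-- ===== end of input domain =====

-- B does one enumerate pass keeping the running minimum and its index list instead of A's
-- two passes (min loop, then an index scan); same result, a simpler single traversal.

-- ===== PORT A =====
def min_order (total_distances : List Int) : Option Int × List Int :=
  -- first loop: running minimum (updates also on ties, value unchanged)
  let m : Option Int := total_distances.foldl
    (fun m arg => match m with
      | none => some arg
      | some v => if arg ≤ v then some arg else some v) none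
  -- second loop: for a in range(len(total_distances)): if min == total_distances[a]: append a
  let min_list : List Int := (PySem.List.pyRange 0 (total_distances.length : Int) 1).foldl
    (fun acc a => if m == some (PySem.List.pyGetD total_distances a 0) then acc ++ [a] else acc) []
  (m, min_list)

-- ===== PORT B =====
def bStep (st : Option Int × List Int) (p : Int × Int) : Option Int × List Int :=
  match st.1 with
  | none => (some p.2, [p.1])
  | some v =>
    if p.2 < v then (some p.2, [p.1])
    else if p.2 == v then (st.1, st.2 ++ [p.1])
    else st

def min_order_alt (total_distances : List Int) : Option Int × List Int :=
  (PySem.List.enumerate total_distances 0).foldl bStep (none, [])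

-- ===== PRECONDITION & SPEC =====
def Spec_min_order (total_distances : List Int) (out : Option Int × List Int) : Prop := out = min_order_alt total_distances
instance (total_distances : List Int) (out : Option Int × List Int) : Decidable (Spec_min_order total_distances out) := by unfold Spec_min_order; infer_instance

-- ===== CLAIM (what is proved, stated in full; the proofs are below) =====
def Claim_equal_min_order : Prop := ∀ (total_distances : List Int), Dom_min_order total_distances → Spec_min_order total_distances (min_order total_distances)

-- ===== LEMMAS AND PROOFS =====

-- A's first loop from a seeded state computes the running minimum.
lemma aMin_some (t : List Int) : ∀ (v : Int),
    t.foldl (fun m arg => match m with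
      | none => some arg
      | some v => if arg ≤ v then some arg else some v) (some v) = some (t.foldl min v) := by
  induction t with
  | nil => intro v; rfl
  | cons x t ih =>
    intro v
    simp only [List.foldl_cons]
    have h : (if x ≤ v then some x else some v) = some (min v x) := by
      split_ifs <;> simp [min_def] <;> omega
    rw [h, ih]

-- B's loop from a seeded state: the final minimum is the running minimum, and the final
-- index list is the kept prefix (iff the minimum never improves) plus the indices of the
-- minimum among the remaining enumerated elements.
lemma bFold_some (t : List Int) : ∀ (k v : Int) (l : List Int),
    (PySem.List.enumerate t k).foldl bStep (some v, l) =
      (some (t.foldl min v),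
       (if t.foldl min v = v then l else []) ++
         ((PySem.List.enumerate t k).filter (fun p => p.2 == t.foldl min v)).map (·.1)) := by
  induction t with
  | nil => intro k v l; simp [PySem.List.enumerate_nil]
  | cons x t ih =>
    intro k v l
    rw [PySem.List.enumerate_cons, List.foldl_cons]
    have hmin : (x :: t).foldl min v = t.foldl min (min v x) := by simp
    rcases lt_trichotomy x v with hlt | heq | hgt
    · -- new strict minimum: reset
      have hstep : bStep (some v, l) (k, x) = (some x, [k]) := by
        simp [bStep, hlt]
      rw [hstep, ih]
      have hmv : min v x = x := by omega
      have hM : (x :: t).foldl min v = t.foldl min x := by rw [hmin, hmv]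
      have hle : t.foldl min x ≤ x := (PySem.List.foldl_min_le t x).1
      have hne : ¬ t.foldl min x = v := by omega
      rw [List.foldl_cons, hmv, List.filter_cons]
      simp only [hne, if_false, List.nil_append]
      by_cases hx : x = t.foldl min x
      · simp [← hx]
      · have hb : (x == t.foldl min x) = false := by simp [hx]
        simp [hb, Ne.symm hx]
    · -- tie with the current minimum: append the index
      have hstep : bStep (some v, l) (k, x) = (some v, l ++ [k]) := by
        simp [bStep, heq]
      rw [hstep, ih]
      have hmv : min v x = v := by omega
      have hM : (x :: t).foldl min v = t.foldl min v := by rw [hmin, hmv]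
      rw [List.foldl_cons, hmv, List.filter_cons]
      by_cases hv : t.foldl min v = v
      · have : (x == t.foldl min v) = true := by simp [heq, hv]
        simp [hv, heq]
      · have : (x == t.foldl min v) = false := by
          simp only [beq_eq_false_iff_ne, ne_eq, heq]; exact fun h => hv h.symm
        simp [hv, this]
    · -- larger element: ignored
      have hstep : bStep (some v, l) (k, x) = (some v, l) := by
        simp only [bStep]
        rw [if_neg (by omega), if_neg (by simp; omega)]
      rw [hstep, ih]
      have hmv : min v x = v := by omega
      have hM : (x :: t).foldl min v = t.foldl min v := by rw [hmin, hmv]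
      have hle : t.foldl min v ≤ v := (PySem.List.foldl_min_le t v).1
      have hx : (x == t.foldl min v) = false := by
        simp only [beq_eq_false_iff_ne, ne_eq]; omega
      rw [List.foldl_cons, hmv, List.filter_cons, hx]
      simp

lemma min_order_eq (xs : List Int) : min_order xs = min_order_alt xs := by
  cases xs with
  | nil => rfl
  | cons x t =>
    -- A side
    show _ = _
    simp only [min_order, List.foldl_cons, aMin_some]
    -- turn A's range-indexed second loop into a loop over enumerate
    rw [← List.foldl_map (f := fun j => ((j : Int), PySem.List.pyGetD (x :: t) j 0))
          (g := fun (acc : List Int) (p : Int × Int) =>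
            if some (t.foldl min x) == some p.2 then acc ++ [p.1] else acc),
        show ((((x :: t).length : Int))) = PySem.List.len (x :: t) by simp [PySem.List.len_eq],
        ← PySem.List.enumerate_eq_map_pyRange (d := 0) (xs := x :: t)]
    rw [PySem.List.foldl_append_if]
    have hB : bStep (none, []) (0, x) = (some x, [0]) := by simp [bStep]
    rw [min_order_alt, PySem.List.enumerate_cons, List.foldl_cons, hB, bFold_some]
    have hle : t.foldl min x ≤ x := (PySem.List.foldl_min_le t x).1
    rw [List.filter_cons]
    have hfc : (PySem.List.enumerate t 1).filter (fun p => t.foldl min x == p.2)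
        = (PySem.List.enumerate t 1).filter (fun p => p.2 == t.foldl min x) :=
      List.filter_congr (by intro p _; simp [eq_comm])
    by_cases hx : x = t.foldl min x
    · simpa [← hx, eq_comm] using congrArg (List.map Prod.fst) hfc
    · have hb1 : (some (t.foldl min x) == some x) = false := by simp [Ne.symm hx]
      simpa [hb1, Ne.symm hx] using congrArg (List.map Prod.fst) hfc

-- ===== VERDICT (by name: the statement is the Claim_ definition above) =====
theorem min_order_spec : Claim_equal_min_order := by
  intro total_distances _
  unfold Spec_min_order
  exact min_order_eq total_distances
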